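-- pv_equiv track=rewrite | github.com/decomand/hanghae99coding | 안전 영역.py | rains
-- ===== SOURCE A (Python) =====
-- from collections import deque
--
-- def rains(maps, sheep): #맵과 강수량입력되면 계산
--     langemap = len(maps)
--     result = 0 #안전영역 개수
--     visited = [[False for _ in range(langemap)] for _ in range(langemap)]
--
--     for x in range(langemap): #순회하며 안전영역 찾기
--         for y in range(langemap):
--             # 안전한 지역이고 아직 방문하지 않은 경우
--             if maps[x][y] > sheep and not visited[x][y]:
--                 result += 1
--                 que = deque()
--                 que.append([x, y])
--                 visited[x][y] = True  # 방문 표시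
--
--                 while que:   #상하 좌우 좌표 큐에넣기
--                     xy = que.popleft()
--                     a, b = xy[0], xy[1]
--
--                     if a-1 >= 0 and maps[a-1][b] > sheep and not visited[a-1][b]:
--                         visited[a-1][b] = True  # 방문 표시
--                         que.append([a-1, b])
--                     if a+1 < langemap and maps[a+1][b] > sheep and not visited[a+1][b]:
--                         visited[a+1][b] = True  # 방문 표시
--                         que.append([a+1, b])
--                     if b-1 >= 0 and maps[a][b-1] > sheep and not visited[a][b-1]:
--                         visited[a][b-1] = True  # 방문 표시
--                         que.append([a, b-1])
--                     if b+1 < langemap and maps[a][b+1] > sheep and not visited[a][b+1]: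
--                         visited[a][b+1] = True  # 방문 표시
--                         que.append([a, b+1])
--
--     return result
-- ===== SOURCE B (Python) =====
-- def rains(maps, sheep):
--     # Union-find over cell indices i = x*n + y, union-by-minimum-index:
--     # the root of each set is always its smallest cell index.
--     n = len(maps)
--     parent = list(range(n * n))
--
--     def find(i):
--         while parent[i] != i:
--             i = parent[i]
--         return i
--
--     def union(i, j):
--         ri, rj = find(i), find(j)
--         if ri < rj:
--             parent[rj] = ri
--         elif rj < ri:
--             parent[ri] = rj
--
--     for x in range(n):
--         for y in range(n):
--             if maps[x][y] > sheep:
--                 if y > 0 and maps[x][y - 1] > sheep: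
--                     union(x * n + y, x * n + y - 1)
--                 if x > 0 and maps[x - 1][y] > sheep:
--                     union(x * n + y, x * n + y - n)
--
--     roots = set()
--     for x in range(n):
--         for y in range(n):
--             if maps[x][y] > sheep:
--                 roots.add(find(x * n + y))
--     return len(roots)
-- ===== Notes on version B (the rewrite author's own statement) =====
-- stated objective: alternative
-- what changed: Replaced the per-seed BFS flood fill (deque + visited matrix) by a disjoint-set union over cell indices with union-by-minimum-index: one sweep unions each safe cell with its left and up safe neighbours, then the count of distinct roots among safe cells is returned.
import Mathlib
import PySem

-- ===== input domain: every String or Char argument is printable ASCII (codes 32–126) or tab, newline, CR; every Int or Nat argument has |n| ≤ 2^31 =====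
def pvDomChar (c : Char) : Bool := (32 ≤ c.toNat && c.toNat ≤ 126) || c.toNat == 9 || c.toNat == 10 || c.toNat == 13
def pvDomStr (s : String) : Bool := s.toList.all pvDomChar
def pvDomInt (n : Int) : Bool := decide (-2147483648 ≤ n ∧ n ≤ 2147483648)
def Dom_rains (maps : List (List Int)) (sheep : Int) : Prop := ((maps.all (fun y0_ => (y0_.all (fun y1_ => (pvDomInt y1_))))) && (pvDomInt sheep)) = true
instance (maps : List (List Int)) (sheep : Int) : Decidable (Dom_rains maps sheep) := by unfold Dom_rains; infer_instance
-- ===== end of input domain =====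

-- B replaces A's per-seed BFS flood fill by a disjoint-set union (union-by-minimum-index)
-- over cell indices; same return value wherever the Python A returns (Pre_).

-- ===== PORT A =====
-- visited[a][b] = True  (an n×n boolean matrix, modelled as a function on coordinates)
def pvMark (v : Nat → Nat → Bool) (a b : Nat) : Nat → Nat → Bool :=
  fun x y => if (x, y) = (a, b) then true else v x y

-- the 'while que' BFS loop of A; fuel only makes the recursion structural (each
-- iteration pops one cell, and cells are enqueued only when freshly marked, so
-- n*n+1 iterations always suffice; the loop itself is transcribed line by line).
-- pvTry is one of the four identical neighbour blocks: geometric guard G, the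
-- safety test and the visited test, then mark + append to the queue.
def pvTry (maps : List (List Int)) (sheep : Int) (G : Prop) [Decidable G] (c d : Nat)
    (st : List (Nat × Nat) × (Nat → Nat → Bool)) : List (Nat × Nat) × (Nat → Nat → Bool) :=
  if G ∧ sheep < (maps.getD c []).getD d 0 ∧ st.2 c d = false then
    (st.1 ++ [(c, d)], pvMark st.2 c d)
  else st

def rainsBFS (maps : List (List Int)) (sheep : Int) (n : Nat) :
    Nat → List (Nat × Nat) → (Nat → Nat → Bool) → (Nat → Nat → Bool)
  | 0, _, v => v
  | _ + 1, [], v => v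
  | fuel + 1, (a, b) :: rest, v =>
    let st := pvTry maps sheep (b+1 < n) a (b+1)
      (pvTry maps sheep (0 < b) a (b-1)
        (pvTry maps sheep (a+1 < n) (a+1) b
          (pvTry maps sheep (0 < a) (a-1) b (rest, v))))
    rainsBFS maps sheep n fuel st.1 st.2

def rains (maps : List (List Int)) (sheep : Int) : Int :=
  let n := maps.length
  (((List.range n).foldl (fun (st : Int × (Nat → Nat → Bool)) x =>
      (List.range n).foldl (fun st y =>
        if sheep < (maps.getD x []).getD y 0 ∧ st.2 x y = false then
          (st.1 + 1, rainsBFS maps sheep n (n*n+1) [(x, y)] (pvMark st.2 x y))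
        else st) st)
    ((0 : Int), (fun _ _ => false : Nat → Nat → Bool)))).1

-- ===== PORT B =====
-- while parent[i] != i: i = parent[i]   (fuel n*n: roots are always set-minima,
-- so parent chains strictly decrease and n*n steps always reach the root)
def pvFind (parent : List Nat) : Nat → Nat → Nat
  | 0, i => i
  | f + 1, i => if parent.getD i i = i then i else pvFind parent f (parent.getD i i)

def pvUnion (n : Nat) (parent : List Nat) (i j : Nat) : List Nat :=
  let ri := pvFind parent (n*n) i
  let rj := pvFind parent (n*n) j
  if ri < rj then parent.set rj ri
  else if rj < ri then parent.set ri rj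
  else parent

def rains_alt (maps : List (List Int)) (sheep : Int) : Int :=
  let n := maps.length
  let parent := (List.range n).foldl (fun p x =>
      (List.range n).foldl (fun p y =>
        if sheep < (maps.getD x []).getD y 0 then
          let p1 := if 0 < y ∧ sheep < (maps.getD x []).getD (y-1) 0 then
              pvUnion n p (x*n+y) (x*n+y-1) else p
          if 0 < x ∧ sheep < (maps.getD (x-1) []).getD y 0 then
              pvUnion n p1 (x*n+y) (x*n+y-n) else p1
        else p) p) (List.range (n*n))
  let roots := (List.range n).foldl (fun s x =>
      (List.range n).foldl (fun s y =>
        if sheep < (maps.getD x []).getD y 0 then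
          PySem.Set.add s (pvFind parent (n*n) (x*n+y)) else s) s)
    (PySem.Set.empty)
  (PySem.Set.len roots : Int)

-- ===== PRECONDITION & SPEC =====
-- Pre_ excludes ragged grids: A indexes maps[x][y] for all x,y < len(maps) and raises
-- IndexError (as does B) when some row is shorter than the number of rows.
-- (The Lean ports totalise that indexing with getD, so the equivalence theorem below
-- holds for them on every input; Pre_ delimits where the PYTHON programs return.)
def Pre_rains (maps : List (List Int)) (sheep : Int) : Prop :=
  ∀ r ∈ maps, maps.length ≤ r.length
instance (maps : List (List Int)) (sheep : Int) : Decidable (Pre_rains maps sheep) := by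
  unfold Pre_rains; infer_instance

def pvWitness_rains : List (List Int) × Int := ([[2, 0], [0, 2]], 1)

def Spec_rains (maps : List (List Int)) (sheep : Int) (out : Int) : Prop := out = rains_alt maps sheep
instance (maps : List (List Int)) (sheep : Int) (out : Int) : Decidable (Spec_rains maps sheep out) := by unfold Spec_rains; infer_instance

-- ===== CLAIM (what is proved, stated in full; the proofs are below) =====
def Claim_equal_rains : Prop := ∀ (maps : List (List Int)) (sheep : Int), Dom_rains maps sheep → Pre_rains maps sheep → Spec_rains maps sheep (rains maps sheep)

-- ===== LEMMAS AND PROOFS =====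

-- safe grid cell
def pvS (maps : List (List Int)) (sheep : Int) (p : Nat × Nat) : Prop :=
  p.1 < maps.length ∧ p.2 < maps.length ∧ sheep < (maps.getD p.1 []).getD p.2 0

-- 4-adjacency between safe grid cells
def pvAdj (maps : List (List Int)) (sheep : Int) (p q : Nat × Nat) : Prop :=
  pvS maps sheep p ∧ pvS maps sheep q ∧
    ((p.1 = q.1 ∧ (p.2 + 1 = q.2 ∨ q.2 + 1 = p.2)) ∨
     (p.2 = q.2 ∧ (p.1 + 1 = q.1 ∨ q.1 + 1 = p.1)))

def pvConn (maps : List (List Int)) (sheep : Int) (p q : Nat × Nat) : Prop :=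
  Relation.ReflTransGen (pvAdj maps sheep) p q

def pvIdx (n : Nat) (p : Nat × Nat) : Nat := p.1 * n + p.2

-- a cell is a leader when it is the row-major-least cell of its safe component
def pvLeader (maps : List (List Int)) (sheep : Int) (p : Nat × Nat) : Prop :=
  pvS maps sheep p ∧ ∀ q, pvConn maps sheep p q → pvIdx maps.length p ≤ pvIdx maps.length q

def pvLeadIdx (maps : List (List Int)) (sheep : Int) (i : Nat) : Prop :=
  ∃ p, pvLeader maps sheep p ∧ pvIdx maps.length p = i

noncomputable def pvLeadB (maps : List (List Int)) (sheep : Int) (i : Nat) : Bool :=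
  @decide (pvLeadIdx maps sheep i) (Classical.propDecidable _)

-- the leaders among the first k row-major cells, in scan order
noncomputable def pvLUpto (maps : List (List Int)) (sheep : Int) (k : Nat) : List Nat :=
  (List.range k).filter (pvLeadB maps sheep)

-- ---- basic facts about the safe-cell graph ----

theorem pvAdj_symm (maps : List (List Int)) (sheep : Int) {p q : Nat × Nat}
    (h : pvAdj maps sheep p q) : pvAdj maps sheep q p := by
  obtain ⟨hp, hq, hc⟩ := h
  exact ⟨hq, hp, by omega⟩

theorem pvConn_symm (maps : List (List Int)) (sheep : Int) {p q : Nat × Nat}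
    (h : pvConn maps sheep p q) : pvConn maps sheep q p :=
  Relation.ReflTransGen.symmetric (fun _ _ hh => pvAdj_symm maps sheep hh) h

theorem pvConn_S (maps : List (List Int)) (sheep : Int) {p q : Nat × Nat}
    (h : pvConn maps sheep p q) (hp : pvS maps sheep p) : pvS maps sheep q := by
  induction h with
  | refl => exact hp
  | tail _ hadj _ => exact hadj.2.1

theorem pvIdx_inj {n : Nat} {p q : Nat × Nat} (hp : p.2 < n) (hq : q.2 < n)
    (h : pvIdx n p = pvIdx n q) : p = q := by
  unfold pvIdx at h
  have hn : 0 < n := by omega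
  have h1 : p.1 = q.1 := by
    have e1 : (p.1 * n + p.2) / n = p.1 := by
      rw [Nat.mul_comm p.1 n, Nat.mul_add_div hn, Nat.div_eq_of_lt hp]; omega
    have e2 : (q.1 * n + q.2) / n = q.1 := by
      rw [Nat.mul_comm q.1 n, Nat.mul_add_div hn, Nat.div_eq_of_lt hq]; omega
    
    rw [← e1, ← e2, h]
  have h2 : p.2 = q.2 := by rw [h1] at h; omega
  exact Prod.ext h1 h2

theorem pvAdj_cases (maps : List (List Int)) (sheep : Int) {a b : Nat} {q : Nat × Nat}
    (h : pvAdj maps sheep (a, b) q) :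
    q = (a-1, b) ∨ q = (a+1, b) ∨ q = (a, b-1) ∨ q = (a, b+1) := by
  obtain ⟨_, _, hc⟩ := h
  rcases q with ⟨c, d⟩
  simp only [Prod.mk.injEq] at *
  omega

-- ---- a foldl-over-range induction principle used for every loop below ----

theorem pvFoldlRangeInd {σ : Type} (g : σ → Nat → σ) (Q : Nat → σ → Prop) (m : Nat) (s : σ)
    (h0 : Q 0 s) (hstep : ∀ y, y < m → ∀ st, Q y st → Q (y+1) (g st y)) :
    Q m ((List.range m).foldl g s) := by
  induction m with
  | zero => simpa using h0
  | succ k ih =>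
    rw [List.range_succ, List.foldl_append]
    exact hstep k (by omega) _ (ih (fun y hy st h => hstep y (by omega) st h))

-- ---- counting unvisited grid cells (the BFS fuel measure) ----

def pvU (n : Nat) (v : Nat → Nat → Bool) : Nat :=
  ((List.range n ×ˢ List.range n).filter (fun p => !(v p.1 p.2))).length

theorem pvU_le (n : Nat) (v : Nat → Nat → Bool) : pvU n v ≤ n * n := by
  calc ((List.range n ×ˢ List.range n).filter (fun p => !(v p.1 p.2))).length
      ≤ (List.range n ×ˢ List.range n).length := List.length_filter_le _ _
    _ = n * n := by simp [List.length_product]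

theorem pvFilterFlip {α : Type} [DecidableEq α] :
    ∀ (l : List α), l.Nodup → ∀ p ∈ l, ∀ (f g : α → Bool), f p = true → g p = false →
      (∀ q, q ≠ p → g q = f q) → (l.filter g).length + 1 = (l.filter f).length := by
  intro l
  induction l with
  | nil => simp
  | cons a t ih =>
    intro hnd p hp f g hf hg hother
    rcases List.mem_cons.mp hp with rfl | hpt
    · have ht : t.filter g = t.filter f := by
        apply List.filter_congr
        intro q hq
        exact hother q (fun e => (List.nodup_cons.mp hnd).1 (e ▸ hq))
      simp [hf, hg, ht]
    · have hap : a ≠ p := fun e => (List.nodup_cons.mp hnd).1 (e ▸ hpt)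
      have hga : g a = f a := hother a hap
      have := ih (List.nodup_cons.mp hnd).2 p hpt f g hf hg hother
      by_cases hfa : f a = true
      · simp [List.filter_cons, hfa, hga ▸ hfa, hga]
        omega
      · have hfa' : f a = false := by revert hfa; cases f a <;> simp
        simp [hfa', hga ▸ hfa']
        omega

theorem pvMark_self (v : Nat → Nat → Bool) (a b : Nat) : pvMark v a b a b = true := by
  simp [pvMark]

theorem pvMark_mono {v : Nat → Nat → Bool} {a b x y : Nat} (h : v x y = true) :
    pvMark v a b x y = true := by
  unfold pvMark; split <;> simp [h]

theorem pvMark_eq_true_iff {v : Nat → Nat → Bool} {a b x y : Nat} :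
    pvMark v a b x y = true ↔ ((x, y) = (a, b) ∨ v x y = true) := by
  unfold pvMark; split <;> simp_all

theorem pvU_mark (n : Nat) (v : Nat → Nat → Bool) (a b : Nat) (ha : a < n) (hb : b < n)
    (hv : v a b = false) : pvU n (pvMark v a b) + 1 = pvU n v := by
  apply pvFilterFlip (List.range n ×ˢ List.range n)
    ((List.nodup_range).product (List.nodup_range)) (a, b)
    (List.mem_product.mpr ⟨List.mem_range.mpr ha, List.mem_range.mpr hb⟩)
  · simp [hv]
  · simp [pvMark_self]
  · intro q hq
    have : ¬ ((q.1, q.2) = (a, b)) := by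
      intro e; exact hq (by rw [← e])
    simp only [pvMark]
    rw [if_neg this]

-- ---- the BFS worklist invariant ----

-- full invariant: marked ⊇ V, marked ⊆ V ∪ component(s₀), queue cells are marked and
-- connected to the seed, marked cells no longer queued have all their neighbours marked
def pvBInv (maps : List (List Int)) (sheep : Int) (s₀ : Nat × Nat) (V : Nat → Nat → Bool)
    (st : List (Nat × Nat) × (Nat → Nat → Bool)) : Prop :=
  (∀ z : Nat × Nat, V z.1 z.2 = true → st.2 z.1 z.2 = true) ∧
  (∀ z : Nat × Nat, st.2 z.1 z.2 = true → V z.1 z.2 = true ∨ (pvS maps sheep z ∧ pvConn maps sheep s₀ z)) ∧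
  (∀ p ∈ st.1, st.2 p.1 p.2 = true ∧ pvConn maps sheep s₀ p) ∧
  (∀ p : Nat × Nat, st.2 p.1 p.2 = true → p ∉ st.1 → ∀ q, pvAdj maps sheep p q → st.2 q.1 q.2 = true) ∧
  (st.2 s₀.1 s₀.2 = true)

-- mid-pop invariant: the closure condition is excused at the popped cell ab
def pvMid (maps : List (List Int)) (sheep : Int) (s₀ : Nat × Nat) (V : Nat → Nat → Bool)
    (ab : Nat × Nat) (st : List (Nat × Nat) × (Nat → Nat → Bool)) : Prop :=
  (∀ z : Nat × Nat, V z.1 z.2 = true → st.2 z.1 z.2 = true) ∧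
  (∀ z : Nat × Nat, st.2 z.1 z.2 = true → V z.1 z.2 = true ∨ (pvS maps sheep z ∧ pvConn maps sheep s₀ z)) ∧
  (∀ p ∈ st.1, st.2 p.1 p.2 = true ∧ pvConn maps sheep s₀ p) ∧
  (∀ p : Nat × Nat, st.2 p.1 p.2 = true → p ∉ st.1 → p ≠ ab → ∀ q, pvAdj maps sheep p q → st.2 q.1 q.2 = true) ∧
  (st.2 s₀.1 s₀.2 = true)

theorem pvStep (maps : List (List Int)) (sheep : Int) (s₀ : Nat × Nat)
    (V : Nat → Nat → Bool) (ab : Nat × Nat)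
    (G : Prop) [Decidable G] (c d : Nat)
    (hG : (G ∧ sheep < (maps.getD c []).getD d 0) ↔ pvAdj maps sheep ab (c, d))
    (hconn : pvConn maps sheep s₀ ab)
    (st : List (Nat × Nat) × (Nat → Nat → Bool))
    (h : pvMid maps sheep s₀ V ab st) :
    pvMid maps sheep s₀ V ab (pvTry maps sheep G c d st) ∧
    (pvAdj maps sheep ab (c, d) → (pvTry maps sheep G c d st).2 c d = true) ∧
    (∀ x y, st.2 x y = true → (pvTry maps sheep G c d st).2 x y = true) ∧
    (pvTry maps sheep G c d st).1.length + pvU maps.length (pvTry maps sheep G c d st).2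
      = st.1.length + pvU maps.length st.2 := by
  obtain ⟨h1, h2, h3, h4, h5⟩ := h
  unfold pvTry
  split
  case isTrue hcond =>
    obtain ⟨hg, hsafe, hfresh⟩ := hcond
    have hadj : pvAdj maps sheep ab (c, d) := hG.mp ⟨hg, hsafe⟩
    have hScd : pvS maps sheep (c, d) := hadj.2.1
    have hconncd : pvConn maps sheep s₀ (c, d) :=
      Relation.ReflTransGen.tail hconn hadj
    refine ⟨⟨?_, ?_, ?_, ?_, ?_⟩, ?_, ?_, ?_⟩
    · intro z hz; exact pvMark_mono (h1 z hz)
    · intro z hz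
      rcases pvMark_eq_true_iff.mp hz with he | hz'
      · have : z = (c, d) := by rw [← he]
        subst this; exact Or.inr ⟨hScd, hconncd⟩
      · exact h2 z hz'
    · intro p hp
      rcases List.mem_append.mp hp with hp' | hp'
      · exact ⟨pvMark_mono (h3 p hp').1, (h3 p hp').2⟩
      · have : p = (c, d) := by simpa using hp'
        subst this; exact ⟨pvMark_self _ _ _, hconncd⟩
    · intro p hp hnp hne q hadj'
      rcases pvMark_eq_true_iff.mp hp with he | hp'
      · exfalso; apply hnp
        have : p = (c, d) := by rw [← he]
        subst this; exact List.mem_append.mpr (Or.inr (by simp))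
      · have hnp' : p ∉ st.1 := fun hmem => hnp (List.mem_append.mpr (Or.inl hmem))
        exact pvMark_mono (h4 p hp' hnp' hne q hadj')
    · exact pvMark_mono h5
    · intro _; exact pvMark_self _ _ _
    · intro x y hxy; exact pvMark_mono hxy
    · simp only [List.length_append, List.length_singleton]
      have := pvU_mark maps.length st.2 c d hScd.1 hScd.2.1 hfresh
      omega
  case isFalse hcond =>
    refine ⟨⟨h1, h2, h3, h4, h5⟩, ?_, fun _ _ h => h, by omega⟩
    intro hadj
    have ⟨hg, hsafe⟩ := hG.mpr hadj
    cases hv : st.2 c d with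
    | true => rfl
    | false => exact absurd ⟨hg, hsafe, hv⟩ hcond

-- after the queue has emptied, the marked set is exactly V ∪ component(s₀)
theorem pvBInv_empty_char (maps : List (List Int)) (sheep : Int) (s₀ : Nat × Nat)
    (V v : Nat → Nat → Bool) (h : pvBInv maps sheep s₀ V ([], v)) :
    ∀ z : Nat × Nat, v z.1 z.2 = true ↔
      (V z.1 z.2 = true ∨ (pvS maps sheep z ∧ pvConn maps sheep s₀ z)) := by
  obtain ⟨h1, h2, _, h4, h5⟩ := h
  intro z
  constructor
  · exact h2 z
  · rintro (hz | ⟨hzS, hzc⟩)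
    · exact h1 z hz
    · clear hzS
      induction hzc with
      | refl => exact h5
      | tail _ hadj ih => exact h4 _ ih (by simp) _ hadj

theorem pvAdj_up (maps : List (List Int)) (sheep : Int) {a b : Nat}
    (hS : pvS maps sheep (a, b)) :
    ((0 < a) ∧ sheep < (maps.getD (a-1) []).getD b 0) ↔ pvAdj maps sheep (a, b) (a-1, b) := by
  constructor
  · rintro ⟨ha, hsafe⟩
    exact ⟨hS, ⟨by have := hS.1; omega, ⟨by exact hS.2.1, hsafe⟩⟩, Or.inr ⟨rfl, Or.inr (by omega)⟩⟩
  · intro h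
    have h0 : 0 < a := by
      rcases h.2.2 with ⟨h1, h2⟩ | ⟨h1, h2⟩ <;> simp only at h1 h2 <;> omega
    exact ⟨h0, h.2.1.2.2⟩

theorem pvAdj_down (maps : List (List Int)) (sheep : Int) {a b : Nat}
    (hS : pvS maps sheep (a, b)) :
    ((a+1 < maps.length) ∧ sheep < (maps.getD (a+1) []).getD b 0) ↔ pvAdj maps sheep (a, b) (a+1, b) := by
  constructor
  · rintro ⟨ha, hsafe⟩
    exact ⟨hS, ⟨ha, ⟨hS.2.1, hsafe⟩⟩, Or.inr ⟨rfl, Or.inl rfl⟩⟩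
  · intro h
    exact ⟨h.2.1.1, h.2.1.2.2⟩

theorem pvAdj_left (maps : List (List Int)) (sheep : Int) {a b : Nat}
    (hS : pvS maps sheep (a, b)) :
    ((0 < b) ∧ sheep < (maps.getD a []).getD (b-1) 0) ↔ pvAdj maps sheep (a, b) (a, b-1) := by
  constructor
  · rintro ⟨hb, hsafe⟩
    exact ⟨hS, ⟨hS.1, ⟨by have := hS.2.1; omega, hsafe⟩⟩, Or.inl ⟨rfl, Or.inr (by omega)⟩⟩
  · intro h
    have h0 : 0 < b := by
      rcases h.2.2 with ⟨h1, h2⟩ | ⟨h1, h2⟩ <;> simp only at h1 h2 <;> omega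
    exact ⟨h0, h.2.1.2.2⟩

theorem pvAdj_right (maps : List (List Int)) (sheep : Int) {a b : Nat}
    (hS : pvS maps sheep (a, b)) :
    ((b+1 < maps.length) ∧ sheep < (maps.getD a []).getD (b+1) 0) ↔ pvAdj maps sheep (a, b) (a, b+1) := by
  constructor
  · rintro ⟨hb, hsafe⟩
    exact ⟨hS, ⟨hS.1, ⟨hb, hsafe⟩⟩, Or.inl ⟨rfl, Or.inl rfl⟩⟩
  · intro h
    exact ⟨h.2.1.2.1, h.2.1.2.2⟩

theorem rainsBFS_spec (maps : List (List Int)) (sheep : Int) (s₀ : Nat × Nat)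
    (V : Nat → Nat → Bool) (hS₀ : pvS maps sheep s₀) :
    ∀ (fuel : Nat) (Q : List (Nat × Nat)) (v : Nat → Nat → Bool),
      pvBInv maps sheep s₀ V (Q, v) →
      Q.length + pvU maps.length v ≤ fuel →
      ∀ z : Nat × Nat, (rainsBFS maps sheep maps.length fuel Q v) z.1 z.2 = true ↔
        (V z.1 z.2 = true ∨ (pvS maps sheep z ∧ pvConn maps sheep s₀ z)) := by
  intro fuel
  induction fuel with
  | zero =>
    intro Q v hinv hb z
    have hQ : Q = [] := by
      cases Q with
      | nil => rfl
      | cons h t => simp at hb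
    subst hQ
    exact pvBInv_empty_char maps sheep s₀ V v hinv z
  | succ fuel ih =>
    intro Q v hinv hb z
    cases Q with
    | nil =>
      exact pvBInv_empty_char maps sheep s₀ V v hinv z
    | cons hd rest =>
      obtain ⟨a, b⟩ := hd
      obtain ⟨h1, h2, h3, h4, h5⟩ := hinv
      have hmem := h3 (a, b) (by simp)
      have hconnab : pvConn maps sheep s₀ (a, b) := hmem.2
      have hSab : pvS maps sheep (a, b) := pvConn_S maps sheep hconnab hS₀
      have hmid : pvMid maps sheep s₀ V (a, b) (rest, v) := by
        refine ⟨h1, h2, fun p hp => h3 p (by simp [hp]), ?_, h5⟩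
        intro p hp hnp hne q hadj
        exact h4 p hp (by simp [hnp, hne]) q hadj
      obtain ⟨m1, e1, o1, acc1⟩ := pvStep maps sheep s₀ V (a, b) (0 < a) (a-1) b
        (pvAdj_up maps sheep hSab) hconnab (rest, v) hmid
      obtain ⟨m2, e2, o2, acc2⟩ := pvStep maps sheep s₀ V (a, b) (a+1 < maps.length) (a+1) b
        (pvAdj_down maps sheep hSab) hconnab _ m1
      obtain ⟨m3, e3, o3, acc3⟩ := pvStep maps sheep s₀ V (a, b) (0 < b) a (b-1)
        (pvAdj_left maps sheep hSab) hconnab _ m2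
      obtain ⟨m4, e4, o4, acc4⟩ := pvStep maps sheep s₀ V (a, b) (b+1 < maps.length) a (b+1)
        (pvAdj_right maps sheep hSab) hconnab _ m3
      set st4 := pvTry maps sheep (b+1 < maps.length) a (b+1)
        (pvTry maps sheep (0 < b) a (b-1)
          (pvTry maps sheep (a+1 < maps.length) (a+1) b
            (pvTry maps sheep (0 < a) (a-1) b (rest, v)))) with hst4
      obtain ⟨n1, n2, n3, n4, n5⟩ := m4
      have hfull : pvBInv maps sheep s₀ V (st4.1, st4.2) := by
        refine ⟨n1, n2, n3, ?_, n5⟩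
        intro p hp hnp q hadj
        by_cases hpe : p = (a, b)
        · subst hpe
          rcases pvAdj_cases maps sheep hadj with he | he | he | he <;> subst he
          · exact o4 _ _ (o3 _ _ (o2 _ _ (e1 hadj)))
          · exact o4 _ _ (o3 _ _ (e2 hadj))
          · exact o4 _ _ (e3 hadj)
          · exact e4 hadj
        · exact n4 p hp hnp hpe q hadj
      have hbound : st4.1.length + pvU maps.length st4.2 ≤ fuel := by
        have hsum : st4.1.length + pvU maps.length st4.2
            = rest.length + pvU maps.length v := by
          rw [acc4, acc3, acc2, acc1]
        simp only [List.length_cons] at hb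
        omega
      have := ih st4.1 st4.2 hfull hbound z
      simpa only [rainsBFS] using this

-- ---- leaders-per-prefix bookkeeping ----

theorem pvLeadB_iff (maps : List (List Int)) (sheep : Int) (i : Nat) :
    pvLeadB maps sheep i = true ↔ pvLeadIdx maps sheep i := by
  simp [pvLeadB]

theorem pvLUpto_succ_true (maps : List (List Int)) (sheep : Int) (k : Nat)
    (h : pvLeadIdx maps sheep k) :
    pvLUpto maps sheep (k+1) = pvLUpto maps sheep k ++ [k] := by
  unfold pvLUpto
  rw [List.range_succ, List.filter_append]
  simp [(pvLeadB_iff maps sheep k).mpr h]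

theorem pvLUpto_succ_false (maps : List (List Int)) (sheep : Int) (k : Nat)
    (h : ¬ pvLeadIdx maps sheep k) :
    pvLUpto maps sheep (k+1) = pvLUpto maps sheep k := by
  unfold pvLUpto
  rw [List.range_succ, List.filter_append]
  have : pvLeadB maps sheep k = false := by
    cases hx : pvLeadB maps sheep k with
    | true => exact absurd ((pvLeadB_iff maps sheep k).mp hx) h
    | false => rfl
  simp [this]

theorem mem_pvLUpto (maps : List (List Int)) (sheep : Int) (k i : Nat) :
    i ∈ pvLUpto maps sheep k ↔ i < k ∧ pvLeadIdx maps sheep i := by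
  unfold pvLUpto
  rw [List.mem_filter, List.mem_range, pvLeadB_iff]

-- given a leader whose index is x*n+y with x,y < n, that leader is the cell (x,y)
theorem pvLeadIdx_cell (maps : List (List Int)) (sheep : Int) {x y : Nat}
    (hx : x < maps.length) (hy : y < maps.length)
    (h : pvLeadIdx maps sheep (x * maps.length + y)) : pvLeader maps sheep (x, y) := by
  obtain ⟨p, hlead, hidx⟩ := h
  have hp : p = (x, y) := by
    apply pvIdx_inj hlead.1.2.1 (show (x,y).2 < maps.length from hy)
    rw [hidx]; rfl
  exact hp ▸ hlead

-- ---- the invariant of A's row-major scan ----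

def pvAInv (maps : List (List Int)) (sheep : Int) (k : Nat) (st : Int × (Nat → Nat → Bool)) : Prop :=
  st.1 = ((pvLUpto maps sheep k).length : Int) ∧
  ∀ z : Nat × Nat, st.2 z.1 z.2 = true ↔
    (pvS maps sheep z ∧ ∃ q, pvConn maps sheep z q ∧ pvIdx maps.length q < k)

theorem pvA_step (maps : List (List Int)) (sheep : Int) (x y : Nat)
    (hx : x < maps.length) (hy : y < maps.length)
    (st : Int × (Nat → Nat → Bool)) (h : pvAInv maps sheep (x*maps.length+y) st) :
    pvAInv maps sheep (x*maps.length+y+1)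
      (if sheep < (maps.getD x []).getD y 0 ∧ st.2 x y = false
       then (st.1 + 1, rainsBFS maps sheep maps.length
              (maps.length*maps.length+1) [(x, y)] (pvMark st.2 x y))
       else st) := by
  obtain ⟨hres, hchar⟩ := h
  have hidxxy : pvIdx maps.length (x, y) = x*maps.length+y := rfl
  split
  case isTrue hcond =>
    obtain ⟨hsafe, hfresh⟩ := hcond
    have hS : pvS maps sheep (x, y) := ⟨hx, hy, hsafe⟩
    have hno : ¬ ∃ q, pvConn maps sheep (x, y) q ∧ pvIdx maps.length q < x*maps.length+y := by
      intro hex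
      have := (hchar (x, y)).mpr ⟨hS, hex⟩
      rw [hfresh] at this; exact absurd this (by simp)
    have hlead : pvLeader maps sheep (x, y) := by
      refine ⟨hS, fun q hq => ?_⟩
      rw [hidxxy]
      by_contra hlt
      exact hno ⟨q, hq, by omega⟩
    have hVclosed : ∀ p q : Nat × Nat, st.2 p.1 p.2 = true → pvAdj maps sheep p q →
        st.2 q.1 q.2 = true := by
      intro p q hp hadj
      obtain ⟨hpS, r, hconn, hr⟩ := (hchar p).mp hp
      exact (hchar q).mpr ⟨hadj.2.1,
        r, Relation.ReflTransGen.trans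
          (Relation.ReflTransGen.single (pvAdj_symm maps sheep hadj)) hconn, hr⟩
    have hbinv : pvBInv maps sheep (x, y) st.2
        ([(x, y)], pvMark st.2 x y) := by
      refine ⟨?_, ?_, ?_, ?_, ?_⟩
      · intro z hz; exact pvMark_mono hz
      · intro z hz
        rcases pvMark_eq_true_iff.mp hz with he | hz'
        · have : z = (x, y) := by rw [← he]
          subst this; exact Or.inr ⟨hS, Relation.ReflTransGen.refl⟩
        · exact Or.inl hz'
      · intro p hp
        have : p = (x, y) := by simpa using hp
        subst this
        exact ⟨pvMark_self _ _ _, Relation.ReflTransGen.refl⟩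
      · intro p hp hnp q hadj
        have hpe : p ≠ (x, y) := fun e => hnp (by simp [e])
        have hp' : st.2 p.1 p.2 = true := by
          rcases pvMark_eq_true_iff.mp hp with he | hz'
          · exact absurd (by rw [← he] : p = (x,y)) hpe
          · exact hz'
        exact pvMark_mono (hVclosed p q hp' hadj)
      · exact pvMark_self _ _ _
    have hfuel : ([(x, y)] : List (Nat × Nat)).length
        + pvU maps.length (pvMark st.2 x y) ≤ maps.length*maps.length+1 := by
      have := pvU_le maps.length (pvMark st.2 x y)
      simp only [List.length_singleton]
      omega
    have hchar' := rainsBFS_spec maps sheep (x, y) st.2 hS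
      (maps.length*maps.length+1) [(x, y)] (pvMark st.2 x y) hbinv hfuel
    constructor
    · show st.1 + 1 = ((pvLUpto maps sheep (x*maps.length+y+1)).length : Int)
      rw [pvLUpto_succ_true maps sheep _ ⟨(x, y), hlead, hidxxy⟩, hres,
        List.length_append, List.length_singleton]
      push_cast
      ring
    · intro z
      rw [hchar' z]
      constructor
      · rintro (hz | ⟨hzS, hzc⟩)
        · obtain ⟨hzS, q, hconn, hq⟩ := (hchar z).mp hz
          exact ⟨hzS, q, hconn, by omega⟩
        · exact ⟨hzS, (x, y), pvConn_symm maps sheep hzc, by rw [hidxxy]; omega⟩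
      · rintro ⟨hzS, q, hconn, hq⟩
        by_cases hqk : pvIdx maps.length q < x*maps.length+y
        · exact Or.inl ((hchar z).mpr ⟨hzS, q, hconn, hqk⟩)
        · have hqe : pvIdx maps.length q = x*maps.length+y := by omega
          have hqS : pvS maps sheep q := pvConn_S maps sheep hconn hzS
          have : q = (x, y) := pvIdx_inj hqS.2.1 hy (by rw [hqe, hidxxy])
          subst this
          exact Or.inr ⟨hzS, pvConn_symm maps sheep hconn⟩
  case isFalse hcond =>
    have hnl : ¬ pvLeadIdx maps sheep (x*maps.length+y) := by
      intro hli
      have hlead := pvLeadIdx_cell maps sheep hx hy hli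
      rcases not_and_or.mp hcond with hns | hnv
      · exact hns hlead.1.2.2
      · have hv : st.2 x y = true := by
          cases hb : st.2 x y with
          | true => rfl
          | false => exact absurd hb hnv
        obtain ⟨_, q, hconn, hq⟩ := (hchar (x, y)).mp hv
        have := hlead.2 q hconn
        rw [hidxxy] at this
        omega
    constructor
    · rw [pvLUpto_succ_false maps sheep _ hnl]; exact hres
    · intro z
      rw [hchar z]
      constructor
      · rintro ⟨hzS, q, hconn, hq⟩
        exact ⟨hzS, q, hconn, by omega⟩
      · rintro ⟨hzS, q, hconn, hq⟩
        by_cases hqk : pvIdx maps.length q < x*maps.length+y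
        · exact ⟨hzS, q, hconn, hqk⟩
        · have hqe : pvIdx maps.length q = x*maps.length+y := by omega
          have hqS : pvS maps sheep q := pvConn_S maps sheep hconn hzS
          have hq' : q = (x, y) := pvIdx_inj hqS.2.1 hy (by rw [hqe, hidxxy])
          subst hq'
          rcases not_and_or.mp hcond with hns | hnv
          · exact absurd hqS.2.2 hns
          · have hv : st.2 x y = true := by
              cases hb : st.2 x y with
              | true => rfl
              | false => exact absurd hb hnv
            obtain ⟨_, r, hconn2, hrlt⟩ := (hchar (x, y)).mp hv
            exact ⟨hzS, r, Relation.ReflTransGen.trans hconn hconn2, hrlt⟩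

theorem rains_bridge (maps : List (List Int)) (sheep : Int) :
    rains maps sheep = ((pvLUpto maps sheep (maps.length * maps.length)).length : Int) := by
  have h0 : pvAInv maps sheep 0 ((0 : Int), (fun _ _ => false : Nat → Nat → Bool)) := by
    constructor
    · simp [pvLUpto]
    · intro z
      constructor
      · intro hz; simp at hz
      · rintro ⟨_, q, _, hq⟩; omega
  have hmain : pvAInv maps sheep (maps.length*maps.length)
      ((List.range maps.length).foldl (fun (st : Int × (Nat → Nat → Bool)) x =>
        (List.range maps.length).foldl (fun st y =>
          if sheep < (maps.getD x []).getD y 0 ∧ st.2 x y = false then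
            (st.1 + 1, rainsBFS maps sheep maps.length
              (maps.length*maps.length+1) [(x, y)] (pvMark st.2 x y))
          else st) st)
        ((0 : Int), (fun _ _ => false : Nat → Nat → Bool))) := by
    have := pvFoldlRangeInd (σ := Int × (Nat → Nat → Bool))
      (fun (st : Int × (Nat → Nat → Bool)) x =>
        (List.range maps.length).foldl (fun st y =>
          if sheep < (maps.getD x []).getD y 0 ∧ st.2 x y = false then
            (st.1 + 1, rainsBFS maps sheep maps.length
              (maps.length*maps.length+1) [(x, y)] (pvMark st.2 x y))
          else st) st)
      (fun x st => pvAInv maps sheep (x*maps.length) st)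
      maps.length
      ((0 : Int), (fun _ _ => false : Nat → Nat → Bool))
      (by simpa using h0)
      (fun x hx st hst => by
        have hin := pvFoldlRangeInd (σ := Int × (Nat → Nat → Bool))
          (fun st y =>
            if sheep < (maps.getD x []).getD y 0 ∧ st.2 x y = false then
              (st.1 + 1, rainsBFS maps sheep maps.length
                (maps.length*maps.length+1) [(x, y)] (pvMark st.2 x y))
            else st)
          (fun y st => pvAInv maps sheep (x*maps.length+y) st)
          maps.length st (by simpa using hst)
          (fun y hy st' hst' => pvA_step maps sheep x y hx hy st' hst')
        show pvAInv maps sheep ((x+1)*maps.length) _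
        have he : (x+1)*maps.length = x*maps.length+maps.length := by ring
        rw [he]
        exact hin)
    simpa using this
  exact hmain.1

-- ---- the union-find development for B ----

-- proof-side mirror of the union-find on plain functions Nat → Nat
def pvFindF (parent : Nat → Nat) : Nat → Nat → Nat
  | 0, i => i
  | f + 1, i => if parent i = i then i else pvFindF parent f (parent i)

def pvUnionF (n : Nat) (parent : Nat → Nat) (i j : Nat) : Nat → Nat :=
  let ri := pvFindF parent (n*n) i
  let rj := pvFindF parent (n*n) j
  if ri < rj then fun k => if k = rj then ri else parent k
  else if rj < ri then fun k => if k = ri then rj else parent k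
  else parent

-- the parent function a parent list denotes (identity outside the list)
def pvPar (l : List Nat) : Nat → Nat := fun i => l.getD i i

theorem pvFind_eq_F (l : List Nat) : ∀ (f i : Nat), pvFind l f i = pvFindF (pvPar l) f i := by
  intro f
  induction f with
  | zero => intro i; rfl
  | succ f ih =>
    intro i
    show (if l.getD i i = i then i else pvFind l f (l.getD i i))
      = (if pvPar l i = i then i else pvFindF (pvPar l) f (pvPar l i))
    by_cases h : l.getD i i = i
    · rw [if_pos h, if_pos (show pvPar l i = i from h)]
    · rw [if_neg h, if_neg (show ¬ pvPar l i = i from h)]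
      exact ih _

theorem pvFindF_le {par : Nat → Nat} (h : ∀ m, par m ≤ m) :
    ∀ (f i : Nat), pvFindF par f i ≤ i := by
  intro f
  induction f with
  | zero => intro i; exact le_refl i
  | succ f ih =>
    intro i
    show (if par i = i then i else pvFindF par f (par i)) ≤ i
    split
    · exact le_refl i
    · exact le_trans (ih (par i)) (h i)

-- edges processed after the first k cells of the row-major sweep: each safe cell is
-- unioned with its safe left/up neighbours, i.e. with its adjacent smaller indices
def pvE (maps : List (List Int)) (sheep : Int) (k : Nat) (i j : Nat) : Prop :=
  ∃ p q : Nat × Nat, pvAdj maps sheep p q ∧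
    pvIdx maps.length q < pvIdx maps.length p ∧ pvIdx maps.length p < k ∧
    i = pvIdx maps.length p ∧ j = pvIdx maps.length q

-- the union-by-minimum invariant: parents never increase, every parent link stays
-- inside the equivalence class generated so far, and every root is its class minimum
def pvUFR (R : Nat → Nat → Prop) (par : Nat → Nat) : Prop :=
  (∀ i, par i ≤ i) ∧ (∀ i, Relation.EqvGen R i (par i)) ∧
  (∀ i j, par i = i → Relation.EqvGen R i j → i ≤ j)

theorem pvEqvGen_congr {R R' : Nat → Nat → Prop} (h : ∀ a b, R a b ↔ R' a b) {x y : Nat} :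
    Relation.EqvGen R x y ↔ Relation.EqvGen R' x y :=
  ⟨Relation.EqvGen.mono (fun a b => (h a b).mp), Relation.EqvGen.mono (fun a b => (h a b).mpr)⟩

theorem pvUFR_congr {R R' : Nat → Nat → Prop} (h : ∀ a b, R a b ↔ R' a b) {par : Nat → Nat}
    (hu : pvUFR R par) : pvUFR R' par :=
  ⟨hu.1, fun i => (pvEqvGen_congr h).mp (hu.2.1 i),
   fun i j hr he => hu.2.2 i j hr ((pvEqvGen_congr h).mpr he)⟩

theorem pvUFR_ext {R : Nat → Nat → Prop} {f g : Nat → Nat} (h : ∀ i, f i = g i)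
    (hu : pvUFR R f) : pvUFR R g := by
  obtain ⟨h1, h2, h3⟩ := hu
  refine ⟨fun i => ?_, fun i => ?_, fun i j hr he => ?_⟩
  · rw [← h i]; exact h1 i
  · rw [← h i]; exact h2 i
  · exact h3 i j (by rw [h i]; exact hr) he

theorem pvPar_getD_set {l : List Nat} {a b k : Nat} (ha : a < l.length) :
    pvPar (l.set a b) k = if k = a then b else pvPar l k := by
  unfold pvPar
  by_cases hk : k = a
  · subst hk
    rw [if_pos rfl]
    simp [List.getD, ha]
  · rw [if_neg hk]
    simp [List.getD, List.getElem?_set_ne (fun e => hk e.symm)]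

theorem pvUnion_len (n : Nat) (l : List Nat) (i j : Nat) :
    (pvUnion n l i j).length = l.length := by
  unfold pvUnion
  dsimp only
  split_ifs <;> simp

theorem pvEqvGen_empty {R : Nat → Nat → Prop} (h : ∀ a b, ¬ R a b) {x y : Nat}
    (he : Relation.EqvGen R x y) : x = y := by
  induction he with
  | rel a b hab => exact absurd hab (h a b)
  | refl => rfl
  | symm a b _ ih => omega
  | trans a b c _ _ ih1 ih2 => omega

theorem pvEqvGen_union {R : Nat → Nat → Prop} {i j : Nat} :
    ∀ {x y : Nat},
    Relation.EqvGen (fun a b => R a b ∨ (a = i ∧ b = j)) x y ↔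
      (Relation.EqvGen R x y ∨ (Relation.EqvGen R x i ∧ Relation.EqvGen R j y) ∨
       (Relation.EqvGen R x j ∧ Relation.EqvGen R i y)) := by
  intro x y
  constructor
  · intro h
    induction h with
    | rel a b hab =>
      rcases hab with hab | ⟨rfl, rfl⟩
      · exact Or.inl (Relation.EqvGen.rel a b hab)
      · exact Or.inr (Or.inl ⟨Relation.EqvGen.refl a, Relation.EqvGen.refl b⟩)
    | refl a => exact Or.inl (Relation.EqvGen.refl a)
    | symm a b _ ih =>
      rcases ih with h1 | ⟨h1, h2⟩ | ⟨h1, h2⟩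
      · exact Or.inl (Relation.EqvGen.symm a b h1)
      · exact Or.inr (Or.inr ⟨Relation.EqvGen.symm _ _ h2, Relation.EqvGen.symm _ _ h1⟩)
      · exact Or.inr (Or.inl ⟨Relation.EqvGen.symm _ _ h2, Relation.EqvGen.symm _ _ h1⟩)
    | trans a b c _ _ ih1 ih2 =>
      rcases ih1 with h1 | ⟨h1, h1'⟩ | ⟨h1, h1'⟩ <;>
        rcases ih2 with h2 | ⟨h2, h2'⟩ | ⟨h2, h2'⟩
      · exact Or.inl (Relation.EqvGen.trans _ _ _ h1 h2)
      · exact Or.inr (Or.inl ⟨Relation.EqvGen.trans _ _ _ h1 h2, h2'⟩)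
      · exact Or.inr (Or.inr ⟨Relation.EqvGen.trans _ _ _ h1 h2, h2'⟩)
      · exact Or.inr (Or.inl ⟨h1, Relation.EqvGen.trans _ _ _ h1' h2⟩)
      · exact Or.inr (Or.inl ⟨h1, h2'⟩)
      · exact Or.inl (Relation.EqvGen.trans _ _ _ h1 h2')
      · exact Or.inr (Or.inr ⟨h1, Relation.EqvGen.trans _ _ _ h1' h2⟩)
      · exact Or.inl (Relation.EqvGen.trans _ _ _ h1 h2')
      · exact Or.inr (Or.inr ⟨h1, h2'⟩)
  · rintro (h | ⟨h1, h2⟩ | ⟨h1, h2⟩)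
    · exact h.mono (fun a b hab => Or.inl hab)
    · exact Relation.EqvGen.trans _ _ _ (h1.mono (fun a b hab => Or.inl hab))
        (Relation.EqvGen.trans _ _ _ (Relation.EqvGen.rel i j (Or.inr ⟨rfl, rfl⟩))
          (h2.mono (fun a b hab => Or.inl hab)))
    · exact Relation.EqvGen.trans _ _ _ (h1.mono (fun a b hab => Or.inl hab))
        (Relation.EqvGen.trans _ _ _
          (Relation.EqvGen.symm _ _ (Relation.EqvGen.rel i j (Or.inr ⟨rfl, rfl⟩)))
          (h2.mono (fun a b hab => Or.inl hab)))

theorem pvFindF_spec {R : Nat → Nat → Prop} {par : Nat → Nat}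
    (h1 : ∀ i, par i ≤ i) (h2 : ∀ i, Relation.EqvGen R i (par i)) :
    ∀ (f i : Nat), i < f →
      par (pvFindF par f i) = pvFindF par f i ∧ Relation.EqvGen R i (pvFindF par f i) := by
  intro f
  induction f with
  | zero => intro i hi; omega
  | succ f ih =>
    intro i hi
    by_cases hpi : par i = i
    · simp only [pvFindF, if_pos hpi]
      exact ⟨hpi, Relation.EqvGen.refl i⟩
    · have hlt : par i < i := Nat.lt_of_le_of_ne (h1 i) hpi
      have hf : par i < f := by omega
      obtain ⟨r1, r2⟩ := ih (par i) hf
      simp only [pvFindF, if_neg hpi]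
      exact ⟨r1, Relation.EqvGen.trans _ _ _ (h2 i) r2⟩

theorem pvFindF_root_min {R : Nat → Nat → Prop} {par : Nat → Nat}
    (h : pvUFR R par) {f i : Nat} (hi : i < f) :
    Relation.EqvGen R i (pvFindF par f i) ∧
    (∀ m, Relation.EqvGen R (pvFindF par f i) m → pvFindF par f i ≤ m) := by
  obtain ⟨hroot, hecl⟩ := pvFindF_spec h.1 h.2.1 f i hi
  exact ⟨hecl, fun m hm => h.2.2 _ m hroot hm⟩

theorem pvUnionF_pres {R : Nat → Nat → Prop} (n : Nat) {par : Nat → Nat}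
    (h : pvUFR R par) (i j : Nat) (hi : i < n*n) (hj : j < n*n) :
    pvUFR (fun a b => R a b ∨ (a = i ∧ b = j)) (pvUnionF n par i j) := by
  obtain ⟨h1, h2, h3⟩ := h
  obtain ⟨ri_root, ri_ecl⟩ := pvFindF_spec h1 h2 (n*n) i hi
  obtain ⟨rj_root, rj_ecl⟩ := pvFindF_spec h1 h2 (n*n) j hj
  unfold pvUnionF
  dsimp only
  set ri := pvFindF par (n*n) i with hri
  set rj := pvFindF par (n*n) j with hrj
  have hbase : ∀ a b : Nat, Relation.EqvGen R a b →
      Relation.EqvGen (fun a b => R a b ∨ (a = i ∧ b = j)) a b :=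
    fun a b hab => hab.mono (fun a b hab => Or.inl hab)
  have hedge : Relation.EqvGen (fun a b => R a b ∨ (a = i ∧ b = j)) i j :=
    Relation.EqvGen.rel i j (Or.inr ⟨rfl, rfl⟩)
  split_ifs with hlt hgt
  · -- ri < rj : rj is re-parented onto ri
    refine ⟨?_, ?_, ?_⟩
    · intro k
      by_cases hk : k = rj
      · simp only [if_pos hk]; omega
      · simp only [if_neg hk]; exact h1 k
    · intro k
      by_cases hk : k = rj
      · subst hk
        simp only [if_pos rfl]
        exact Relation.EqvGen.trans _ _ _
          (Relation.EqvGen.symm _ _ (hbase _ _ rj_ecl))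
          (Relation.EqvGen.trans _ _ _ (Relation.EqvGen.symm _ _ hedge)
            (hbase _ _ ri_ecl))
      · simp only [if_neg hk]; exact hbase _ _ (h2 k)
    · intro k m hroot hkm
      have hknej : k ≠ rj := by
        intro he; subst he; simp at hroot; omega
      simp only [if_neg hknej] at hroot
      rcases pvEqvGen_union.mp hkm with hb | ⟨hb1, hb2⟩ | ⟨hb1, hb2⟩
      · exact h3 k m hroot hb
      · have hkri : k = ri := by
          have e1 : Relation.EqvGen R k ri := Relation.EqvGen.trans _ _ _ hb1 ri_ecl
          have le1 := h3 k ri hroot e1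
          have le2 := h3 ri k ri_root (Relation.EqvGen.symm _ _ e1)
          omega
        have hrjm : rj ≤ m :=
          h3 rj m rj_root
            (Relation.EqvGen.trans _ _ _ (Relation.EqvGen.symm _ _ rj_ecl) hb2)
        omega
      · exfalso
        apply hknej
        have e1 : Relation.EqvGen R k rj := Relation.EqvGen.trans _ _ _ hb1 rj_ecl
        have le1 := h3 k rj hroot e1
        have le2 := h3 rj k rj_root (Relation.EqvGen.symm _ _ e1)
        omega
  · -- rj < ri : ri is re-parented onto rj
    refine ⟨?_, ?_, ?_⟩
    · intro k
      by_cases hk : k = ri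
      · simp only [if_pos hk]; omega
      · simp only [if_neg hk]; exact h1 k
    · intro k
      by_cases hk : k = ri
      · subst hk
        simp only [if_pos rfl]
        exact Relation.EqvGen.trans _ _ _
          (Relation.EqvGen.symm _ _ (hbase _ _ ri_ecl))
          (Relation.EqvGen.trans _ _ _ hedge (hbase _ _ rj_ecl))
      · simp only [if_neg hk]; exact hbase _ _ (h2 k)
    · intro k m hroot hkm
      have hkneri : k ≠ ri := by
        intro he; subst he; simp at hroot; omega
      simp only [if_neg hkneri] at hroot
      rcases pvEqvGen_union.mp hkm with hb | ⟨hb1, hb2⟩ | ⟨hb1, hb2⟩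
      · exact h3 k m hroot hb
      · exfalso
        apply hkneri
        have e1 : Relation.EqvGen R k ri := Relation.EqvGen.trans _ _ _ hb1 ri_ecl
        have le1 := h3 k ri hroot e1
        have le2 := h3 ri k ri_root (Relation.EqvGen.symm _ _ e1)
        omega
      · have hkrj : k = rj := by
          have e1 : Relation.EqvGen R k rj := Relation.EqvGen.trans _ _ _ hb1 rj_ecl
          have le1 := h3 k rj hroot e1
          have le2 := h3 rj k rj_root (Relation.EqvGen.symm _ _ e1)
          omega
        have hrim : ri ≤ m :=
          h3 ri m ri_root
            (Relation.EqvGen.trans _ _ _ (Relation.EqvGen.symm _ _ ri_ecl) hb2)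
        omega
  · -- ri = rj : the edge is redundant, parent is unchanged
    have hrr : ri = rj := by omega
    have hij : Relation.EqvGen R i j :=
      Relation.EqvGen.trans _ _ _ ri_ecl (hrr ▸ Relation.EqvGen.symm _ _ rj_ecl)
    refine ⟨h1, fun k => hbase _ _ (h2 k), ?_⟩
    intro k m hroot hkm
    rcases pvEqvGen_union.mp hkm with hb | ⟨hb1, hb2⟩ | ⟨hb1, hb2⟩
    · exact h3 k m hroot hb
    · exact h3 k m hroot
        (Relation.EqvGen.trans _ _ _ hb1 (Relation.EqvGen.trans _ _ _ hij hb2))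
    · exact h3 k m hroot
        (Relation.EqvGen.trans _ _ _ hb1
          (Relation.EqvGen.trans _ _ _ (Relation.EqvGen.symm _ _ hij) hb2))

theorem pvPar_union {R : Nat → Nat → Prop} (n : Nat) (l : List Nat) (i j : Nat)
    (hi : i < l.length) (hj : j < l.length) (hu : pvUFR R (pvPar l)) :
    ∀ k, pvPar (pvUnion n l i j) k = pvUnionF n (pvPar l) i j k := by
  intro k
  unfold pvUnion pvUnionF
  dsimp only
  rw [pvFind_eq_F, pvFind_eq_F]
  have hri : pvFindF (pvPar l) (n*n) i < l.length :=
    lt_of_le_of_lt (pvFindF_le hu.1 (n*n) i) hi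
  have hrj : pvFindF (pvPar l) (n*n) j < l.length :=
    lt_of_le_of_lt (pvFindF_le hu.1 (n*n) j) hj
  split_ifs
  · rw [pvPar_getD_set hrj]
  · rw [pvPar_getD_set hri]
  · rfl

theorem pvIdx_lt (maps : List (List Int)) (sheep : Int) {p : Nat × Nat}
    (hS : pvS maps sheep p) : pvIdx maps.length p < maps.length*maps.length := by
  obtain ⟨h1, h2, _⟩ := hS
  unfold pvIdx
  have hm : p.1*maps.length ≤ (maps.length-1)*maps.length :=
    Nat.mul_le_mul_right _ (by omega)
  have he : (maps.length-1+1)*maps.length = (maps.length-1)*maps.length + maps.length := by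
    ring
  have he2 : maps.length-1+1 = maps.length := by omega
  rw [he2] at he
  omega

theorem pvE_zero (maps : List (List Int)) (sheep : Int) :
    ∀ a b, ¬ pvE maps sheep 0 a b := by
  rintro a b ⟨p, q, _, _, hpk, _, _⟩
  omega

theorem pvE_mono (maps : List (List Int)) (sheep : Int) {k k' a b : Nat} (hk : k ≤ k')
    (h : pvE maps sheep k a b) : pvE maps sheep k' a b := by
  obtain ⟨p, q, hadj, hqp, hpk, ha, hb⟩ := h
  exact ⟨p, q, hadj, hqp, by omega, ha, hb⟩

theorem pvE_succ (maps : List (List Int)) (sheep : Int) (x y : Nat)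
    (hx : x < maps.length) (hy : y < maps.length) :
    ∀ a b, pvE maps sheep (x*maps.length+y+1) a b ↔
      (pvE maps sheep (x*maps.length+y) a b ∨
       (pvAdj maps sheep (x, y) (x, y-1) ∧ a = x*maps.length+y ∧ b = x*maps.length+y-1) ∨
       (pvAdj maps sheep (x, y) (x-1, y) ∧ a = x*maps.length+y ∧ b = x*maps.length+y-maps.length)) := by
  intro a b
  constructor
  · rintro ⟨p, q, hadj, hqp, hpk, ha, hb⟩
    by_cases hplt : pvIdx maps.length p < x*maps.length+y
    · exact Or.inl ⟨p, q, hadj, hqp, hplt, ha, hb⟩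
    · have hpe : pvIdx maps.length p = x*maps.length+y := by omega
      have hpxy : p = (x, y) := pvIdx_inj hadj.1.2.1 hy (by rw [hpe]; rfl)
      subst hpxy
      rcases pvAdj_cases maps sheep hadj with he | he | he | he <;> subst he <;>
        unfold pvIdx at hqp hpe ha hb
      · -- q = (x-1, y) : the up edge
        refine Or.inr (Or.inr ⟨hadj, by omega, ?_⟩)
        have hx0 : 0 < x := by
          by_contra hx0
          have : x = 0 := by omega
          subst this
          simp at hqp
        have he2 : (x-1)*maps.length + maps.length = x*maps.length := by
          have e1 : x-1+1 = x := by omega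
          calc (x-1)*maps.length + maps.length = (x-1+1)*maps.length := by ring
            _ = x*maps.length := by rw [e1]
        simp only at hb ⊢
        omega
      · -- q = (x+1, y) : impossible, larger index
        exfalso
        have he2 : (x+1)*maps.length = x*maps.length + maps.length := by ring
        simp only at hqp
        omega
      · -- q = (x, y-1) : the left edge
        refine Or.inr (Or.inl ⟨hadj, by omega, ?_⟩)
        simp only at hb hqp ⊢
        omega
      · -- q = (x, y+1) : impossible, larger index
        exfalso
        simp only at hqp
        omega
  · rintro (h | ⟨hadj, rfl, rfl⟩ | ⟨hadj, rfl, rfl⟩)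
    · exact pvE_mono maps sheep (by omega) h
    · have hy0 : 0 < y := by
        rcases hadj.2.2 with ⟨h1, h2⟩ | ⟨h1, h2⟩ <;> simp only at h1 h2 <;> omega
      refine ⟨(x, y), (x, y-1), hadj, ?_, ?_, ?_, ?_⟩ <;> unfold pvIdx <;> simp only <;> omega
    · have hx0 : 0 < x := by
        rcases hadj.2.2 with ⟨h1, h2⟩ | ⟨h1, h2⟩ <;> simp only at h1 h2 <;> omega
      have he2 : (x-1)*maps.length + maps.length = x*maps.length := by
        have e1 : x-1+1 = x := by omega
        calc (x-1)*maps.length + maps.length = (x-1+1)*maps.length := by ring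
          _ = x*maps.length := by rw [e1]
      refine ⟨(x, y), (x-1, y), hadj, ?_, ?_, ?_, ?_⟩ <;> unfold pvIdx <;> simp only <;> omega

theorem pvE_succ_nosafe (maps : List (List Int)) (sheep : Int) (x y : Nat)
    (hx : x < maps.length) (hy : y < maps.length)
    (hns : ¬ sheep < (maps.getD x []).getD y 0) :
    ∀ a b, pvE maps sheep (x*maps.length+y+1) a b ↔ pvE maps sheep (x*maps.length+y) a b := by
  intro a b
  constructor
  · rintro ⟨p, q, hadj, hqp, hpk, ha, hb⟩
    by_cases hplt : pvIdx maps.length p < x*maps.length+y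
    · exact ⟨p, q, hadj, hqp, hplt, ha, hb⟩
    · exfalso
      have hpe : pvIdx maps.length p = x*maps.length+y := by omega
      have hpxy : p = (x, y) := pvIdx_inj hadj.1.2.1 hy (by rw [hpe]; rfl)
      apply hns
      have := hadj.1.2.2
      rw [hpxy] at this
      exact this
  · exact pvE_mono maps sheep (by omega)

theorem pvEcl_final_iff (maps : List (List Int)) (sheep : Int) (i j : Nat) :
    Relation.EqvGen (pvE maps sheep (maps.length*maps.length)) i j ↔
      (i = j ∨ ∃ p q : Nat × Nat, pvS maps sheep p ∧ pvConn maps sheep p q ∧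
        i = pvIdx maps.length p ∧ j = pvIdx maps.length q) := by
  constructor
  · intro h
    induction h with
    | rel a b hab =>
      obtain ⟨p, q, hadj, _, _, ha, hb⟩ := hab
      exact Or.inr ⟨p, q, hadj.1, Relation.ReflTransGen.single hadj, ha, hb⟩
    | refl a => exact Or.inl rfl
    | symm a b _ ih =>
      rcases ih with rfl | ⟨p, q, hSp, hc, ha, hb⟩
      · exact Or.inl rfl
      · exact Or.inr ⟨q, p, pvConn_S maps sheep hc hSp, pvConn_symm maps sheep hc, hb, ha⟩
    | trans a b c _ _ ih1 ih2 =>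
      rcases ih1 with rfl | ⟨p, q, hSp, hc1, ha, hb⟩
      · exact ih2
      · rcases ih2 with rfl | ⟨p', q', hSp', hc2, hb', hc'⟩
        · exact Or.inr ⟨p, q, hSp, hc1, ha, hb⟩
        · have hq : q = p' := by
            apply pvIdx_inj (pvConn_S maps sheep hc1 hSp).2.1 hSp'.2.1
            omega
          subst hq
          exact Or.inr ⟨p, q', hSp, Relation.ReflTransGen.trans hc1 hc2, ha, hc'⟩
  · rintro (rfl | ⟨p, q, hSp, hc, rfl, rfl⟩)
    · exact Relation.EqvGen.refl i
    · induction hc with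
      | refl => exact Relation.EqvGen.refl _
      | tail hc' hadj ih =>
        rename_i c q'
        have hne : pvIdx maps.length c ≠ pvIdx maps.length q' := by
          intro he
          have : c = q' := pvIdx_inj hadj.1.2.1 hadj.2.1.2.1 he
          subst this
          rcases hadj.2.2 with ⟨h1, h2⟩ | ⟨h1, h2⟩ <;> omega
        by_cases hlt : pvIdx maps.length q' < pvIdx maps.length c
        · exact Relation.EqvGen.trans _ _ _ ih
            (Relation.EqvGen.rel _ _
              ⟨c, q', hadj, hlt, pvIdx_lt maps sheep hadj.1, rfl, rfl⟩)
        · exact Relation.EqvGen.trans _ _ _ ih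
            (Relation.EqvGen.symm _ _ (Relation.EqvGen.rel _ _
              ⟨q', c, pvAdj_symm maps sheep hadj, by omega,
                pvIdx_lt maps sheep hadj.2.1, rfl, rfl⟩))

theorem pvB_step (maps : List (List Int)) (sheep : Int) (x y : Nat)
    (hx : x < maps.length) (hy : y < maps.length)
    (l : List Nat) (hlen : l.length = maps.length*maps.length)
    (h : pvUFR (pvE maps sheep (x*maps.length+y)) (pvPar l)) :
    (if sheep < (maps.getD x []).getD y 0 then
        let p1 := if 0 < y ∧ sheep < (maps.getD x []).getD (y-1) 0 then
            pvUnion maps.length l (x*maps.length+y) (x*maps.length+y-1) else l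
        if 0 < x ∧ sheep < (maps.getD (x-1) []).getD y 0 then
            pvUnion maps.length p1 (x*maps.length+y) (x*maps.length+y-maps.length) else p1
      else l).length = maps.length*maps.length ∧
    pvUFR (pvE maps sheep (x*maps.length+y+1))
      (pvPar (if sheep < (maps.getD x []).getD y 0 then
        let p1 := if 0 < y ∧ sheep < (maps.getD x []).getD (y-1) 0 then
            pvUnion maps.length l (x*maps.length+y) (x*maps.length+y-1) else l
        if 0 < x ∧ sheep < (maps.getD (x-1) []).getD y 0 then
            pvUnion maps.length p1 (x*maps.length+y) (x*maps.length+y-maps.length) else p1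
      else l)) := by
  split
  case isTrue hsafe =>
    have hS : pvS maps sheep (x, y) := ⟨hx, hy, hsafe⟩
    have hk : x*maps.length+y < maps.length*maps.length := pvIdx_lt maps sheep hS
    have hadjL := pvAdj_left maps sheep (a := x) (b := y) hS
    have hadjU := pvAdj_up maps sheep (a := x) (b := y) hS
    dsimp only
    by_cases hgl : 0 < y ∧ sheep < (maps.getD x []).getD (y-1) 0 <;>
      by_cases hgu : 0 < x ∧ sheep < (maps.getD (x-1) []).getD y 0
    · rw [if_pos hgl, if_pos hgu]
      have hp1 : ∀ k, pvPar (pvUnion maps.length l (x*maps.length+y) (x*maps.length+y-1)) k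
          = pvUnionF maps.length (pvPar l) (x*maps.length+y) (x*maps.length+y-1) k :=
        pvPar_union maps.length l _ _ (by omega) (by omega) h
      have h1 := pvUFR_ext (fun k => (hp1 k).symm)
        (pvUnionF_pres maps.length h (x*maps.length+y) (x*maps.length+y-1) hk (by omega))
      have hlen1 : (pvUnion maps.length l (x*maps.length+y) (x*maps.length+y-1)).length
          = maps.length*maps.length := by rw [pvUnion_len, hlen]
      have hp2 : ∀ k, pvPar (pvUnion maps.length
            (pvUnion maps.length l (x*maps.length+y) (x*maps.length+y-1))
            (x*maps.length+y) (x*maps.length+y-maps.length)) k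
          = pvUnionF maps.length
              (pvPar (pvUnion maps.length l (x*maps.length+y) (x*maps.length+y-1)))
              (x*maps.length+y) (x*maps.length+y-maps.length) k :=
        pvPar_union maps.length _ _ _ (by omega) (by omega) h1
      have h2 := pvUFR_ext (fun k => (hp2 k).symm)
        (pvUnionF_pres maps.length h1 (x*maps.length+y) (x*maps.length+y-maps.length)
          hk (by omega))
      refine ⟨by rw [pvUnion_len, pvUnion_len, hlen], ?_⟩
      refine pvUFR_congr (fun a b => ?_) h2
      rw [pvE_succ maps sheep x y hx hy a b]
      have hL := hadjL.mp hgl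
      have hU := hadjU.mp hgu
      tauto
    · rw [if_pos hgl, if_neg hgu]
      have hp1 : ∀ k, pvPar (pvUnion maps.length l (x*maps.length+y) (x*maps.length+y-1)) k
          = pvUnionF maps.length (pvPar l) (x*maps.length+y) (x*maps.length+y-1) k :=
        pvPar_union maps.length l _ _ (by omega) (by omega) h
      have h1 := pvUFR_ext (fun k => (hp1 k).symm)
        (pvUnionF_pres maps.length h (x*maps.length+y) (x*maps.length+y-1) hk (by omega))
      refine ⟨by rw [pvUnion_len, hlen], ?_⟩
      refine pvUFR_congr (fun a b => ?_) h1
      rw [pvE_succ maps sheep x y hx hy a b]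
      have hL := hadjL.mp hgl
      have hU : ¬ pvAdj maps sheep (x, y) (x-1, y) := fun ha => hgu (hadjU.mpr ha)
      tauto
    · rw [if_neg hgl, if_pos hgu]
      have hp1 : ∀ k, pvPar (pvUnion maps.length l (x*maps.length+y)
            (x*maps.length+y-maps.length)) k
          = pvUnionF maps.length (pvPar l) (x*maps.length+y) (x*maps.length+y-maps.length) k :=
        pvPar_union maps.length l _ _ (by omega) (by omega) h
      have h1 := pvUFR_ext (fun k => (hp1 k).symm)
        (pvUnionF_pres maps.length h (x*maps.length+y) (x*maps.length+y-maps.length)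
          hk (by omega))
      refine ⟨by rw [pvUnion_len, hlen], ?_⟩
      refine pvUFR_congr (fun a b => ?_) h1
      rw [pvE_succ maps sheep x y hx hy a b]
      have hL : ¬ pvAdj maps sheep (x, y) (x, y-1) := fun ha => hgl (hadjL.mpr ha)
      have hU := hadjU.mp hgu
      tauto
    · rw [if_neg hgl, if_neg hgu]
      refine ⟨hlen, ?_⟩
      refine pvUFR_congr (fun a b => ?_) h
      rw [pvE_succ maps sheep x y hx hy a b]
      have hL : ¬ pvAdj maps sheep (x, y) (x, y-1) := fun ha => hgl (hadjL.mpr ha)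
      have hU : ¬ pvAdj maps sheep (x, y) (x-1, y) := fun ha => hgu (hadjU.mpr ha)
      tauto
  case isFalse hns =>
    exact ⟨hlen,
      pvUFR_congr (fun a b => (pvE_succ_nosafe maps sheep x y hx hy hns a b).symm) h⟩

-- one step of B's root-collection sweep
theorem pvRoot_step (maps : List (List Int)) (sheep : Int) (parent : List Nat)
    (hUF : pvUFR (pvE maps sheep (maps.length*maps.length)) (pvPar parent))
    (x y : Nat) (hx : x < maps.length) (hy : y < maps.length)
    (s : PySem.Set Nat) (hs : s = pvLUpto maps sheep (x*maps.length+y)) :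
    (if sheep < (maps.getD x []).getD y 0 then
      PySem.Set.add s (pvFind parent (maps.length*maps.length) (x*maps.length+y)) else s)
      = pvLUpto maps sheep (x*maps.length+y+1) := by
  split
  case isTrue hsafe =>
    have hS : pvS maps sheep (x, y) := ⟨hx, hy, hsafe⟩
    have hk : x*maps.length+y < maps.length*maps.length := pvIdx_lt maps sheep hS
    have hidxxy : pvIdx maps.length (x, y) = x*maps.length+y := rfl
    obtain ⟨hecl, hmin⟩ := pvFindF_root_min hUF hk
    rw [pvFind_eq_F]
    set r := pvFindF (pvPar parent) (maps.length*maps.length) (x*maps.length+y) with hr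
    have hrk : r ≤ x*maps.length+y := hmin _ (Relation.EqvGen.symm _ _ hecl)
    -- a leader witness for the value r
    have hwit : ∃ w : Nat × Nat, pvLeader maps sheep w ∧ pvIdx maps.length w = r ∧
        pvConn maps sheep (x, y) w := by
      rcases (pvEcl_final_iff maps sheep _ _).mp hecl with he | ⟨p, q, hSp, hc, hip, hiq⟩
      · refine ⟨(x, y), ⟨hS, fun z hz => ?_⟩, by omega, Relation.ReflTransGen.refl⟩
        have : Relation.EqvGen (pvE maps sheep (maps.length*maps.length))
            (x*maps.length+y) (pvIdx maps.length z) :=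
          (pvEcl_final_iff maps sheep _ _).mpr (Or.inr ⟨(x, y), z, hS, hz, rfl, rfl⟩)
        rw [← he] at hmin
        have := hmin _ this
        rw [hidxxy]
        omega
      · have hpxy : p = (x, y) := pvIdx_inj hSp.2.1 hy (by rw [← hip]; rfl)
        subst hpxy
        have hSq : pvS maps sheep q := pvConn_S maps sheep hc hSp
        refine ⟨q, ⟨hSq, fun z hz => ?_⟩, hiq.symm, hc⟩
        have : Relation.EqvGen (pvE maps sheep (maps.length*maps.length))
            (pvIdx maps.length q) (pvIdx maps.length z) :=
          (pvEcl_final_iff maps sheep _ _).mpr (Or.inr ⟨q, z, hSq, hz, rfl, rfl⟩)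
        rw [← hiq] at this
        exact hiq ▸ (hmin _ this)
    obtain ⟨w, hwl, hwidx, hwconn⟩ := hwit
    have hLr : pvLeadIdx maps sheep r := ⟨w, hwl, hwidx⟩
    have hiff : r = x*maps.length+y ↔ pvLeadIdx maps sheep (x*maps.length+y) := by
      constructor
      · intro he; exact he ▸ hLr
      · intro hli
        have hlead := pvLeadIdx_cell maps sheep hx hy hli
        have := hlead.2 w hwconn
        rw [hidxxy, hwidx] at this
        omega
    by_cases hre : r = x*maps.length+y
    · have hnotmem : r ∉ s := by
        rw [hs]
        intro hmem
        have := (mem_pvLUpto maps sheep _ r).mp hmem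
        omega
      have hco : PySem.Set.contains s r = false := by
        cases hc : PySem.Set.contains s r with
        | false => rfl
        | true =>
          exfalso
          apply hnotmem
          simpa [PySem.Set.contains] using hc
      rw [PySem.Set.add, hco]
      simp only [Bool.false_eq_true, if_false]
      rw [hs, hre, pvLUpto_succ_true maps sheep _ (hiff.mp hre)]
    · have hrlt : r < x*maps.length+y := by omega
      have hmem : r ∈ s := by
        rw [hs]
        exact (mem_pvLUpto maps sheep _ r).mpr ⟨hrlt, hLr⟩
      have hco : PySem.Set.contains s r = true := by
        simpa [PySem.Set.contains] using hmem
      rw [PySem.Set.add, hco]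
      simp only [if_true]
      rw [hs, pvLUpto_succ_false maps sheep _ (fun hli => hre (hiff.mpr hli))]
  case isFalse hns =>
    rw [hs, pvLUpto_succ_false]
    intro hli
    exact hns (pvLeadIdx_cell maps sheep hx hy hli).1.2.2

theorem rains_alt_bridge (maps : List (List Int)) (sheep : Int) :
    rains_alt maps sheep = ((pvLUpto maps sheep (maps.length * maps.length)).length : Int) := by
  have hUF : ((List.range maps.length).foldl (fun p x =>
        (List.range maps.length).foldl (fun p y =>
          if sheep < (maps.getD x []).getD y 0 then
            let p1 := if 0 < y ∧ sheep < (maps.getD x []).getD (y-1) 0 then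
                pvUnion maps.length p (x*maps.length+y) (x*maps.length+y-1) else p
            if 0 < x ∧ sheep < (maps.getD (x-1) []).getD y 0 then
                pvUnion maps.length p1 (x*maps.length+y) (x*maps.length+y-maps.length) else p1
          else p) p) (List.range (maps.length*maps.length))).length = maps.length*maps.length ∧
      pvUFR (pvE maps sheep (maps.length*maps.length))
      (pvPar ((List.range maps.length).foldl (fun p x =>
        (List.range maps.length).foldl (fun p y =>
          if sheep < (maps.getD x []).getD y 0 then
            let p1 := if 0 < y ∧ sheep < (maps.getD x []).getD (y-1) 0 then
                pvUnion maps.length p (x*maps.length+y) (x*maps.length+y-1) else p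
            if 0 < x ∧ sheep < (maps.getD (x-1) []).getD y 0 then
                pvUnion maps.length p1 (x*maps.length+y) (x*maps.length+y-maps.length) else p1
          else p) p) (List.range (maps.length*maps.length)))) := by
    have h0 : pvUFR (pvE maps sheep 0) (pvPar (List.range (maps.length*maps.length))) := by
      have hid : ∀ i, pvPar (List.range (maps.length*maps.length)) i = i := by
        intro i
        unfold pvPar
        by_cases hi : i < maps.length*maps.length
        · rw [List.getD_eq_getElem _ _ (by simpa using hi)]
          simp
        · rw [List.getD_eq_default _ _ (by simpa using hi)]
      refine ⟨fun i => le_of_eq (hid i), fun i => ?_, fun i j hr he => ?_⟩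
      · rw [hid i]
        exact Relation.EqvGen.refl i
      · rw [pvEqvGen_empty (pvE_zero maps sheep) he]
    have := pvFoldlRangeInd (σ := List Nat)
      (fun p x =>
        (List.range maps.length).foldl (fun p y =>
          if sheep < (maps.getD x []).getD y 0 then
            let p1 := if 0 < y ∧ sheep < (maps.getD x []).getD (y-1) 0 then
                pvUnion maps.length p (x*maps.length+y) (x*maps.length+y-1) else p
            if 0 < x ∧ sheep < (maps.getD (x-1) []).getD y 0 then
                pvUnion maps.length p1 (x*maps.length+y) (x*maps.length+y-maps.length) else p1
          else p) p)
      (fun x l => l.length = maps.length*maps.length ∧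
        pvUFR (pvE maps sheep (x*maps.length)) (pvPar l))
      maps.length (List.range (maps.length*maps.length))
      ⟨by simp, by simpa using h0⟩
      (fun x hx l hl => by
        have hin := pvFoldlRangeInd (σ := List Nat)
          (fun p y =>
            if sheep < (maps.getD x []).getD y 0 then
              let p1 := if 0 < y ∧ sheep < (maps.getD x []).getD (y-1) 0 then
                  pvUnion maps.length p (x*maps.length+y) (x*maps.length+y-1) else p
              if 0 < x ∧ sheep < (maps.getD (x-1) []).getD y 0 then
                  pvUnion maps.length p1 (x*maps.length+y) (x*maps.length+y-maps.length) else p1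
            else p)
          (fun y l => l.length = maps.length*maps.length ∧
            pvUFR (pvE maps sheep (x*maps.length+y)) (pvPar l))
          maps.length l (by simpa using hl)
          (fun y hy l' hl' => pvB_step maps sheep x y hx hy l' hl'.1 hl'.2)
        show _ ∧ pvUFR (pvE maps sheep ((x+1)*maps.length)) _
        have he : (x+1)*maps.length = x*maps.length+maps.length := by ring
        rw [he]
        exact hin)
    simpa using this
  set parent := (List.range maps.length).foldl (fun p x =>
    (List.range maps.length).foldl (fun p y =>
      if sheep < (maps.getD x []).getD y 0 then
        let p1 := if 0 < y ∧ sheep < (maps.getD x []).getD (y-1) 0 then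
            pvUnion maps.length p (x*maps.length+y) (x*maps.length+y-1) else p
        if 0 < x ∧ sheep < (maps.getD (x-1) []).getD y 0 then
            pvUnion maps.length p1 (x*maps.length+y) (x*maps.length+y-maps.length) else p1
      else p) p) (List.range (maps.length*maps.length)) with hparent
  have hroots : ((List.range maps.length).foldl (fun s x =>
      (List.range maps.length).foldl (fun s y =>
        if sheep < (maps.getD x []).getD y 0 then
          PySem.Set.add s (pvFind parent (maps.length*maps.length) (x*maps.length+y)) else s) s)
      (PySem.Set.empty : PySem.Set Nat))
      = pvLUpto maps sheep (maps.length*maps.length) := by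
    have := pvFoldlRangeInd (σ := PySem.Set Nat)
      (fun s x =>
        (List.range maps.length).foldl (fun s y =>
          if sheep < (maps.getD x []).getD y 0 then
            PySem.Set.add s (pvFind parent (maps.length*maps.length) (x*maps.length+y)) else s) s)
      (fun x s => s = pvLUpto maps sheep (x*maps.length))
      maps.length (PySem.Set.empty : PySem.Set Nat)
      (by simp [PySem.Set.empty, pvLUpto])
      (fun x hx s hs => by
        have hin := pvFoldlRangeInd (σ := PySem.Set Nat)
          (fun s y =>
            if sheep < (maps.getD x []).getD y 0 then
              PySem.Set.add s (pvFind parent (maps.length*maps.length) (x*maps.length+y)) else s)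
          (fun y s => s = pvLUpto maps sheep (x*maps.length+y))
          maps.length s (by simpa using hs)
          (fun y hy s' hs' => pvRoot_step maps sheep parent hUF.2 x y hx hy s' hs')
        show _ = pvLUpto maps sheep ((x+1)*maps.length)
        have he : (x+1)*maps.length = x*maps.length+maps.length := by ring
        rw [he]
        exact hin)
    simpa using this
  show (PySem.Set.len _ : Int) = _
  rw [hroots]
  rfl

-- ===== VERDICT (by name: the statement is the Claim_ definition above) =====
theorem rains_spec : Claim_equal_rains := by
  intro maps sheep _ _
  unfold Spec_rains
  rw [rains_bridge maps sheep, rains_alt_bridge maps sheep]
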